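-- pv_equiv track=rewrite | github.com/Mielecki/Minimalizacja | minimalizacja.py | check
-- ===== SOURCE A (Python) =====
-- import string
--
-- var = string.ascii_lowercase
--
-- def check(expr):
--     operators = ('&', '|', '>', '^', '/') # krotka z dostępnymi operatorami
--     counter = 0 # zmienna odpowiedzalna za zliczanie nawiasów, zwiększa się gdy nawias otwierający, zmniejsza się przy zamykającym
--     status = True # gdy True oczekiwany jest nawias otwierający, zmienna lub negacja
--
--     for ch in expr: # główna pętla funkcji odpowiedziala za zwiększanie/zmiejszania counter'a oraz zmiany statusu
--         if status:
--             if ch == '(':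
--                 counter += 1
--             elif ch in var:
--                 status = False
--             elif ch == "~":
--                 pass
--             else:
--                 return False
--         else:
--             if ch == ')':
--                 counter -= 1
--             elif ch in operators:
--                 status = True
--             else:
--                 return False
--         if counter < 0: # więcej nawiasów zamykających niż otwierających więc wyrażenie jest niepoprawne
--             return False
--
--     if counter == 0 and not status: # tyle samo nawiasów oraz status jest fałszywy więc wyrażenie jest prawidłowe
--         return True
--
--     return False
-- ===== SOURCE B (Python) =====
-- import string
--
-- def check(expr):
--     # recursive-descent parser: expr := term (op term)*, term := '~'* ('(' expr ')' | lowercase)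
--     n = len(expr)
--
--     def parse_term(i):
--         while i < n and expr[i] == '~':
--             i += 1
--         if i < n and expr[i] == '(':
--             j = parse_expr(i + 1)
--             if j is not None and j < n and expr[j] == ')':
--                 return j + 1
--             return None
--         if i < n and expr[i] in string.ascii_lowercase:
--             return i + 1
--         return None
--
--     def parse_expr(i):
--         i = parse_term(i)
--         if i is None:
--             return None
--         while i < n and expr[i] in '&|>^/':
--             i = parse_term(i + 1)
--             if i is None:
--                 return None
--         return i
--
--     return parse_expr(0) == n
-- ===== Notes on version B (the rewrite author's own statement) =====
-- stated objective: alternative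
-- what changed: Replaced A's single-pass flag+counter state-machine scan with a recursive-descent parser (parse_term/parse_expr over an index) for the grammar expr := term (op term)*, term := '~'* ('(' expr ')' | lowercase), requiring full consumption.
import Mathlib
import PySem

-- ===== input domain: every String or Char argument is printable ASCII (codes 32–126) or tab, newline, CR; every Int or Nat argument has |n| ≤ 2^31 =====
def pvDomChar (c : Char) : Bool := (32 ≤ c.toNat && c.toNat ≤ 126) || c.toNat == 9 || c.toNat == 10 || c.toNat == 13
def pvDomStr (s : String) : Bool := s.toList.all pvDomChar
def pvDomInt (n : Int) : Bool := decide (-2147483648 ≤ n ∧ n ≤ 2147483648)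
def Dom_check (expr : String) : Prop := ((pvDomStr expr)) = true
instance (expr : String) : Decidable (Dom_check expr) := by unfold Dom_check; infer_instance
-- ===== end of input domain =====

-- B replaces A's flat flag+counter scan by a recursive-descent parser of the grammar
-- expr := term (op term)*, term := '~'* ('(' expr ')' | lowercase); objective: alternative.


-- ===== PORT A =====
-- `ch in var` where var = string.ascii_lowercase
def isLower (ch : Char) : Bool := 'a' ≤ ch && ch ≤ 'z'
-- `ch in operators`, operators = ('&','|','>','^','/')
def isOp (ch : Char) : Bool := ch = '&' || ch = '|' || ch = '>' || ch = '^' || ch = '/'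

-- one iteration of A's loop body (both branches, tests in A's order); none = `return False`
def stepA (ch : Char) (counter : Int) (status : Bool) : Option (Int × Bool) :=
  if status then
    if ch = '(' then some (counter + 1, status)
    else if isLower ch then some (counter, false)
    else if ch = '~' then some (counter, status)
    else none
  else
    if ch = ')' then some (counter - 1, status)
    else if isOp ch then some (counter, true)
    else none

-- A's for-loop with its early returns (incl. the `counter < 0` check after each char),
-- then the final `counter == 0 and not status`
def checkGo : List Char → Int → Bool → Bool
  | [], counter, status => decide (counter = 0) && !status
  | ch :: t, counter, status =>
    match stepA ch counter status with
    | none => false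
    | some (c', st') => if c' < 0 then false else checkGo t c' st'

def check (expr : String) : Bool := checkGo expr.toList 0 true

-- ===== PORT B =====
-- Recursive descent on the remaining character list; `none` = parse failure,
-- `some r` = success leaving rest r. The Nat fuel only makes the mutual recursion
-- structural (2*length+3 always suffices); B's python recurses on indices directly.
mutual
-- parse_term: skip '~'s, then '(' expr ')' or one lowercase letter
def termP : Nat → List Char → Option (List Char)
  | 0, _ => none
  | _ + 1, [] => none
  | f + 1, ch :: t =>
    if ch = '~' then termP f t
    else if ch = '(' then
      match exprP f t with
      | none => none
      | some [] => none
      | some (d :: u) => if d = ')' then some u else none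
    else if isLower ch then some t else none
-- parse_expr: a term, then the operator loop
def exprP : Nat → List Char → Option (List Char)
  | 0, _ => none
  | f + 1, s =>
    match termP f s with
    | none => none
    | some u => opsP f u
-- the `while next char is an operator` loop of parse_expr
def opsP : Nat → List Char → Option (List Char)
  | 0, _ => none
  | _ + 1, [] => some []
  | f + 1, ch :: t =>
    if isOp ch then
      match termP f t with
      | none => none
      | some u => opsP f u
    else some (ch :: t)
end

-- parse_expr(0) == n : success and full consumption
def check_alt (expr : String) : Bool :=
  exprP (2 * expr.toList.length + 3) expr.toList == some []

-- ===== PRECONDITION & SPEC =====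
def Spec_check (expr : String) (out : Bool) : Prop := out = check_alt expr
instance (expr : String) (out : Bool) : Decidable (Spec_check expr out) := by unfold Spec_check; infer_instance

-- ===== CLAIM (what is proved, stated in full; the proofs are below) =====
def Claim_equal_check : Prop := ∀ (expr : String), Dom_check expr → Spec_check expr (check expr)

-- ===== LEMMAS AND PROOFS =====

-- A's scan as a state transformer (no final acceptance test); none = early `return False`
def scanA : List Char → Int → Bool → Option (Int × Bool)
  | [], c, st => some (c, st)
  | ch :: t, c, st =>
    match stepA ch c st with
    | none => none
    | some (c', st') => if c' < 0 then none else scanA t c' st'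

theorem checkGo_eq_scanA (s : List Char) (c : Int) (st : Bool) :
    checkGo s c st = match scanA s c st with
      | none => false
      | some (c', st') => decide (c' = 0) && !st' := by
  induction s generalizing c st with
  | nil => simp [checkGo, scanA]
  | cons ch t ih =>
    simp only [checkGo, scanA]
    cases stepA ch c st with
    | none => rfl
    | some p =>
      obtain ⟨c', st'⟩ := p
      by_cases h : c' < 0 <;> simp [h, ih]

theorem lower_ne_lparen {ch : Char} (h : isLower ch = true) : ch ≠ '(' := by
  intro e; subst e; simp [isLower] at h
theorem op_ne_rparen {ch : Char} (h : isOp ch = true) : ch ≠ ')' := by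
  intro e; subst e; simp [isOp] at h

-- evaluations of stepA on the character classes the parser distinguishes
theorem stepA_true_tilde (c : Int) : stepA '~' c true = some (c, true) := by
  simp [stepA, isLower]
theorem stepA_true_lparen (c : Int) : stepA '(' c true = some (c + 1, true) := by
  simp [stepA]
theorem stepA_true_lower {ch : Char} (h : isLower ch = true) (c : Int) :
    stepA ch c true = some (c, false) := by
  simp [stepA, lower_ne_lparen h, h]
theorem stepA_true_none {ch : Char} (h1 : ch ≠ '(') (h2 : isLower ch = false) (h3 : ch ≠ '~')
    (c : Int) : stepA ch c true = none := by
  simp [stepA, h1, h2, h3]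
theorem stepA_false_rparen (c : Int) : stepA ')' c false = some (c - 1, false) := by
  simp [stepA]
theorem stepA_false_op {ch : Char} (h : isOp ch = true) (c : Int) :
    stepA ch c false = some (c, true) := by
  simp [stepA, op_ne_rparen h, h]
theorem stepA_false_none {ch : Char} (h1 : ch ≠ ')') (h2 : isOp ch = false) (c : Int) :
    stepA ch c false = none := by
  simp [stepA, h1, h2]
theorem scanA_cons_some {ch : Char} {t : List Char} {c c' : Int} {st st' : Bool}
    (h : stepA ch c st = some (c', st')) (h2 : ¬ c' < 0) :
    scanA (ch :: t) c st = scanA t c' st' := by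
  simp [scanA, h, h2]
theorem scanA_cons_none {ch : Char} {t : List Char} {c : Int} {st : Bool}
    (h : stepA ch c st = none) : scanA (ch :: t) c st = none := by
  simp [scanA, h]

-- a successful parse consumes at least one char (termP/exprP), resp. at least zero (opsP)
theorem parse_lengths (f : Nat) :
    (∀ s r, termP f s = some r → r.length < s.length) ∧
    (∀ s r, exprP f s = some r → r.length < s.length) ∧
    (∀ s r, opsP f s = some r → r.length ≤ s.length) := by
  induction f with
  | zero => refine ⟨?_, ?_, ?_⟩ <;> intro s r h <;> simp [termP, exprP, opsP] at h
  | succ f ih =>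
    obtain ⟨iht, ihe, iho⟩ := ih
    refine ⟨?_, ?_, ?_⟩
    · intro s r h
      match s with
      | [] => simp [termP] at h
      | ch :: t =>
        simp only [termP] at h
        by_cases h1 : ch = '~'
        · rw [if_pos h1] at h
          have := iht t r h
          simp only [List.length_cons]; omega
        · rw [if_neg h1] at h
          by_cases h2 : ch = '('
          · rw [if_pos h2] at h
            cases he : exprP f t with
            | none => rw [he] at h; exact absurd h (by simp)
            | some u =>
              rw [he] at h
              match u with
              | [] => exact absurd h (by simp)
              | d :: v =>
                dsimp only at h
                by_cases h3 : d = ')'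
                · rw [if_pos h3] at h
                  have := ihe t (d :: v) he
                  simp only [Option.some.injEq] at h
                  subst h
                  simp only [List.length_cons] at this ⊢; omega
                · rw [if_neg h3] at h; exact absurd h (by simp)
          · rw [if_neg h2] at h
            by_cases h3 : isLower ch
            · rw [if_pos h3] at h
              simp only [Option.some.injEq] at h
              subst h; simp
            · rw [if_neg h3] at h; exact absurd h (by simp)
    · intro s r h
      simp only [exprP] at h
      cases ht : termP f s with
      | none => rw [ht] at h; exact absurd h (by simp)
      | some u =>
        rw [ht] at h
        have h1 := iht s u ht
        have h2 := iho u r h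
        omega
    · intro s r h
      match s with
      | [] => simp [opsP] at h; simp [h]
      | ch :: t =>
        simp only [opsP] at h
        by_cases hop : isOp ch
        · rw [if_pos hop] at h
          cases ht : termP f t with
          | none => rw [ht] at h; exact absurd h (by simp)
          | some u =>
            rw [ht] at h
            have h1 := iht t u ht
            have h2 := iho u r h
            simp only [List.length_cons]; omega
        · rw [if_neg hop] at h
          simp only [Option.some.injEq] at h
          subst h; simp

-- scanning the consumed part of a successful parse: term/expr turn (c,true) into (c,false),
-- the operator loop preserves (c,false)
theorem parse_sound (f : Nat) :
    (∀ s r (c : Int), 0 ≤ c → termP f s = some r → scanA s c true = scanA r c false) ∧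
    (∀ s r (c : Int), 0 ≤ c → exprP f s = some r → scanA s c true = scanA r c false) ∧
    (∀ s r (c : Int), 0 ≤ c → opsP f s = some r → scanA s c false = scanA r c false) := by
  induction f with
  | zero => refine ⟨?_, ?_, ?_⟩ <;> intro s r c hc h <;> simp [termP, exprP, opsP] at h
  | succ f ih =>
    obtain ⟨iht, ihe, iho⟩ := ih
    refine ⟨?_, ?_, ?_⟩
    · intro s r c hc h
      match s with
      | [] => simp [termP] at h
      | ch :: t =>
        simp only [termP] at h
        by_cases h1 : ch = '~'
        · rw [if_pos h1] at h
          subst h1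
          rw [scanA_cons_some (stepA_true_tilde c) (by omega)]
          exact iht t r c hc h
        · rw [if_neg h1] at h
          by_cases h2 : ch = '('
          · rw [if_pos h2] at h
            subst h2
            cases he : exprP f t with
            | none => rw [he] at h; exact absurd h (by simp)
            | some u =>
              rw [he] at h
              match u with
              | [] => exact absurd h (by simp)
              | d :: v =>
                dsimp only at h
                by_cases h3 : d = ')'
                · rw [if_pos h3] at h
                  subst h3
                  simp only [Option.some.injEq] at h
                  subst h
                  rw [scanA_cons_some (stepA_true_lparen c) (by omega)]
                  rw [ihe t _ (c + 1) (by omega) he]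
                  rw [scanA_cons_some (stepA_false_rparen (c + 1)) (by omega)]
                  simp only [add_sub_cancel_right]
                · rw [if_neg h3] at h; exact absurd h (by simp)
          · rw [if_neg h2] at h
            by_cases h3 : isLower ch
            · rw [if_pos h3] at h
              simp only [Option.some.injEq] at h
              subst h
              rw [scanA_cons_some (stepA_true_lower h3 c) (by omega)]
            · rw [if_neg h3] at h; exact absurd h (by simp)
    · intro s r c hc h
      simp only [exprP] at h
      cases ht : termP f s with
      | none => rw [ht] at h; exact absurd h (by simp)
      | some u =>
        rw [ht] at h
        rw [iht s u c hc ht]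
        exact iho u r c hc h
    · intro s r c hc h
      match s with
      | [] => simp [opsP] at h; subst h; rfl
      | ch :: t =>
        simp only [opsP] at h
        by_cases hop : isOp ch
        · rw [if_pos hop] at h
          cases ht : termP f t with
          | none => rw [ht] at h; exact absurd h (by simp)
          | some u =>
            rw [ht] at h
            rw [scanA_cons_some (stepA_false_op hop c) (by omega)]
            rw [iht t u c hc ht]
            exact iho u r c hc h
        · rw [if_neg hop] at h
          simp only [Option.some.injEq] at h
          subst h
          rfl

-- the operator loop stops only at end of input or at a non-operator
theorem opsP_head (f : Nat) :
    ∀ s r, opsP f s = some r → r = [] ∨ ∃ d u, r = d :: u ∧ isOp d = false := by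
  induction f with
  | zero => intro s r h; simp [opsP] at h
  | succ f ih =>
    intro s r h
    match s with
    | [] => simp [opsP] at h; subst h; exact Or.inl rfl
    | ch :: t =>
      simp only [opsP] at h
      by_cases hop : isOp ch
      · rw [if_pos hop] at h
        cases ht : termP f t with
        | none => rw [ht] at h; exact absurd h (by simp)
        | some u => rw [ht] at h; exact ih u r h
      · rw [if_neg hop] at h
        simp only [Option.some.injEq] at h
        exact Or.inr ⟨ch, t, h.symm, Bool.not_eq_true _ ▸ (by simpa using hop)⟩

-- completeness: an accepted scan decomposes along the parser
theorem parse_complete (n : Nat) :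
    ∀ s (c : Int), s.length ≤ n → 0 ≤ c →
      ((scanA s c true = some (0, false) →
        ∀ f, 2 * s.length + 2 ≤ f →
          ∃ r, termP f s = some r ∧ scanA r c false = some (0, false)) ∧
       (scanA s c false = some (0, false) →
        ∀ f, 2 * s.length + 2 ≤ f →
          ∃ r, opsP f s = some r ∧ scanA r c false = some (0, false))) := by
  induction n with
  | zero =>
    intro s c hlen hc
    match s with
    | [] =>
      constructor
      · intro hscan; simp [scanA] at hscan
      · intro hscan f hf
        obtain ⟨f', rfl⟩ : ∃ f', f = f' + 1 := ⟨f - 1, by omega⟩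
        simp [scanA] at hscan
        exact ⟨[], rfl, by simp [scanA, hscan]⟩
    | ch :: t => simp at hlen
  | succ n ih =>
    intro s c hlen hc
    match s with
    | [] =>
      constructor
      · intro hscan; simp [scanA] at hscan
      · intro hscan f hf
        obtain ⟨f', rfl⟩ : ∃ f', f = f' + 1 := ⟨f - 1, by omega⟩
        simp [scanA] at hscan
        exact ⟨[], rfl, by simp [scanA, hscan]⟩
    | ch :: t =>
      have hlt : t.length ≤ n := by simp at hlen; omega
      constructor
      · -- term side
        intro hscan f hf
        simp only [List.length_cons] at hf
        by_cases h1 : ch = '~'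
        · subst h1
          rw [scanA_cons_some (stepA_true_tilde c) (by omega)] at hscan
          obtain ⟨f', rfl⟩ : ∃ f', f = f' + 1 := ⟨f - 1, by omega⟩
          obtain ⟨r, hr, hsr⟩ := (ih t c hlt hc).1 hscan f' (by omega)
          refine ⟨r, ?_, hsr⟩
          simp only [termP]
          simpa using hr
        · by_cases h2 : ch = '('
          · subst h2
            rw [scanA_cons_some (stepA_true_lparen c) (by omega)] at hscan
            obtain ⟨f'', rfl⟩ : ∃ f'', f = f'' + 2 := ⟨f - 2, by omega⟩
            obtain ⟨r1, ht1, hs1⟩ := (ih t (c + 1) hlt (by omega)).1 hscan f'' (by omega)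
            have hlr1 : r1.length < t.length := (parse_lengths f'').1 t r1 ht1
            obtain ⟨r2, ho2, hs2⟩ :=
              (ih r1 (c + 1) (by omega) (by omega)).2 hs1 f'' (by omega)
            rcases opsP_head f'' r1 r2 ho2 with rfl | ⟨d, u, rfl, hdop⟩
            · simp [scanA] at hs2; omega
            · by_cases hd : d = ')'
              · subst hd
                rw [scanA_cons_some (stepA_false_rparen (c + 1)) (by omega)] at hs2
                simp only [add_sub_cancel_right] at hs2
                refine ⟨u, ?_, hs2⟩
                have he : exprP (f'' + 1) t = some (')' :: u) := by
                  simp only [exprP]; rw [ht1]; exact ho2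
                show termP (f'' + 1 + 1) ('(' :: t) = some u
                simp [termP, he]
              · rw [scanA_cons_none (stepA_false_none hd hdop (c + 1))] at hs2
                exact absurd hs2 (by simp)
          · by_cases h3 : isLower ch
            · rw [scanA_cons_some (stepA_true_lower h3 c) (by omega)] at hscan
              obtain ⟨f', rfl⟩ : ∃ f', f = f' + 1 := ⟨f - 1, by omega⟩
              refine ⟨t, ?_, hscan⟩
              simp only [termP]
              rw [if_neg h1, if_neg h2, if_pos h3]
            · rw [scanA_cons_none
                (stepA_true_none h2 (by simpa using h3) h1 c)] at hscan
              exact absurd hscan (by simp)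
      · -- ops side
        intro hscan f hf
        simp only [List.length_cons] at hf
        obtain ⟨f', rfl⟩ : ∃ f', f = f' + 1 := ⟨f - 1, by omega⟩
        by_cases hd : ch = ')'
        · subst hd
          refine ⟨')' :: t, ?_, hscan⟩
          simp [opsP, isOp]
        · by_cases hop : isOp ch
          · rw [scanA_cons_some (stepA_false_op hop c) (by omega)] at hscan
            obtain ⟨r1, ht1, hs1⟩ := (ih t c hlt hc).1 hscan f' (by omega)
            have hlr1 : r1.length < t.length := (parse_lengths f').1 t r1 ht1
            obtain ⟨r2, ho2, hs2⟩ := (ih r1 c (by omega) hc).2 hs1 f' (by omega)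
            refine ⟨r2, ?_, hs2⟩
            simp only [opsP]
            rw [if_pos hop, ht1]
            exact ho2
          · rw [scanA_cons_none
              (stepA_false_none hd (by simpa using hop) c)] at hscan
            exact absurd hscan (by simp)

theorem check_eq (s : List Char) :
    checkGo s 0 true = (exprP (2 * s.length + 3) s == some []) := by
  rw [checkGo_eq_scanA]
  cases he : exprP (2 * s.length + 3) s with
  | some r =>
    have hs : scanA s 0 true = scanA r 0 false :=
      (parse_sound (2 * s.length + 3)).2.1 s r 0 le_rfl he
    rw [hs]
    -- r is the rest left by the operator loop: empty, or headed by a non-operator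
    have hhead : r = [] ∨ ∃ d u, r = d :: u ∧ isOp d = false := by
      have e3 : 2 * s.length + 3 = (2 * s.length + 2) + 1 := by omega
      rw [e3] at he
      simp only [exprP] at he
      cases ht : termP (2 * s.length + 2) s with
      | none => rw [ht] at he; exact absurd he (by simp)
      | some u1 =>
        rw [ht] at he
        exact opsP_head (2 * s.length + 2) u1 r he
    rcases hhead with rfl | ⟨d, u, rfl, hdop⟩
    · simp [scanA]
    · have hnone : scanA (d :: u) 0 false = none := by
        by_cases hd : d = ')'
        · subst hd
          simp [scanA, stepA_false_rparen]
        · exact scanA_cons_none (stepA_false_none hd hdop 0)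
      rw [hnone]
      simp
  | none =>
    cases hscan : scanA s 0 true with
    | none => simp
    | some p =>
      obtain ⟨c', st'⟩ := p
      by_cases hc0 : c' = 0
      · by_cases hst : st' = false
        · exfalso
          subst hc0 hst
          obtain ⟨r1, ht1, hs1⟩ :=
            (parse_complete s.length s 0 le_rfl le_rfl).1 hscan (2 * s.length + 2) le_rfl
          have hlr1 : r1.length < s.length := (parse_lengths _).1 s r1 ht1
          obtain ⟨r2, ho2, _⟩ :=
            (parse_complete s.length r1 0 (by omega) le_rfl).2 hs1 (2 * s.length + 2) (by omega)
          have he2 : exprP (2 * s.length + 3) s = some r2 := by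
            have e3 : 2 * s.length + 3 = (2 * s.length + 2) + 1 := by omega
            rw [e3]
            simp only [exprP]
            rw [ht1]
            exact ho2
          rw [he2] at he
          exact absurd he (by simp)
        · simp [Bool.not_eq_false] at hst
          simp [hst]
      · simp [hc0]

-- ===== VERDICT (by name: the statement is the Claim_ definition above) =====
theorem check_spec : Claim_equal_check := by
  intro expr _
  show check expr = check_alt expr
  unfold check check_alt
  exact check_eq expr.toList
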